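-- pv_equiv track=rewrite | github.com/kurzonmorris/autoIkabot | autoIkabot/core/token_handler.py | _validate_token
-- ===== SOURCE A (Python) =====
-- def _validate_token(token: str) -> bool:
--     """Check that a blackbox token has the expected structure.
--
--     A valid token starts with 'tra:' and the body contains uppercase
--     letters, lowercase letters, and digits.
--
--     Parameters
--     ----------
--     token : str
--         The token string to validate.
--
--     Returns
--     -------
--     bool
--         True if the token looks valid.
--     """
--     if not token.startswith("tra:"):
--         return False
--     body = token[4:]
--     if len(body) < 10:
--         return False
--     has_upper = any(c.isupper() for c in body)
--     has_lower = any(c.islower() for c in body)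
--     has_digit = any(c.isdigit() for c in body)
--     return has_upper and has_lower and has_digit
-- ===== SOURCE B (Python) =====
-- def _validate_token(token: str) -> bool:
--     if not token.startswith("tra:"):
--         return False
--     body = token[4:]
--     if len(body) < 10:
--         return False
--     has_upper = has_lower = has_digit = False
--     for c in body:
--         has_upper = has_upper or c.isupper()
--         has_lower = has_lower or c.islower()
--         has_digit = has_digit or c.isdigit()
--         if has_upper and has_lower and has_digit:
--             return True
--     return has_upper and has_lower and has_digit
-- ===== Notes on version B (the rewrite author's own statement) =====
-- stated objective: alternative
-- what changed: The three separate any() scans over the body are replaced by a single pass that maintains three boolean flags and returns early once all three character classes have been seen.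
import Mathlib
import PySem

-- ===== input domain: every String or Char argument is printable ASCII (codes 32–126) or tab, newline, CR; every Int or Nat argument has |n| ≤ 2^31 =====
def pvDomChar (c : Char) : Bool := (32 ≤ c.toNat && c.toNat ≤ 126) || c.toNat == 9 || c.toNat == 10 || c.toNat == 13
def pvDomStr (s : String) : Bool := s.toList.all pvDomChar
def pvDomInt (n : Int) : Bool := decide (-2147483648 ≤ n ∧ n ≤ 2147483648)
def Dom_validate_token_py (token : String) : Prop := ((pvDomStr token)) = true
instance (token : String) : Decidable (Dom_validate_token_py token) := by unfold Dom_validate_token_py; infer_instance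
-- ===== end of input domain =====

-- ===== PORT A =====
-- Port of A: startswith guard, slice body, length guard, three any() scans.
def validate_token_py (token : String) : Bool :=
  if !(PySem.Str.startswith token "tra:") then false
  else
    let body := PySem.List.slice token.toList (some 4) none
    if body.length < 10 then false
    else
      let has_upper := body.any PySem.Chars.isupper
      let has_lower := body.any PySem.Chars.islower
      let has_digit := body.any PySem.Chars.isdigit
      has_upper && has_lower && has_digit

-- ===== PORT B =====
-- Port of B: one pass over the body maintaining three flags, returning early when all are set.
def scanFlags : List Char → Bool → Bool → Bool → Bool
  | [], u, l, d => u && l && d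
  | c :: cs, u, l, d =>
    let u' := u || PySem.Chars.isupper c
    let l' := l || PySem.Chars.islower c
    let d' := d || PySem.Chars.isdigit c
    if u' && l' && d' then true else scanFlags cs u' l' d'

def validate_token_py_alt (token : String) : Bool :=
  if !(PySem.Str.startswith token "tra:") then false
  else
    let body := PySem.List.slice token.toList (some 4) none
    if body.length < 10 then false
    else scanFlags body false false false

-- ===== PRECONDITION & SPEC =====
def Spec_validate_token_py (token : String) (out : Bool) : Prop := out = validate_token_py_alt token
instance (token : String) (out : Bool) : Decidable (Spec_validate_token_py token out) := by unfold Spec_validate_token_py; infer_instance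

-- ===== CLAIM (what is proved, stated in full; the proofs are below) =====
def Claim_equal_validate_token_py : Prop := ∀ (token : String), Dom_validate_token_py token → Spec_validate_token_py token (validate_token_py token)

-- ===== LEMMAS AND PROOFS =====

-- ===== VERDICT (by name: the statement is the Claim_ definition above) =====
-- The single-flag pass computes the conjunction of the three any() scans.
theorem scanFlags_eq (cs : List Char) (u l d : Bool) :
    scanFlags cs u l d =
      ((u || cs.any PySem.Chars.isupper) && (l || cs.any PySem.Chars.islower)
        && (d || cs.any PySem.Chars.isdigit)) := by
  induction cs generalizing u l d with
  | nil => simp [scanFlags]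
  | cons c cs ih =>
    simp only [scanFlags, List.any_cons]
    split
    · rename_i h
      simp only [Bool.and_eq_true, Bool.or_eq_true] at h
      obtain ⟨⟨hu, hl⟩, hd⟩ := h
      rcases hu with hu | hu <;> rcases hl with hl | hl <;> rcases hd with hd | hd <;>
        simp [hu, hl, hd]
    · rw [ih]; ac_rfl

theorem validate_token_py_spec : Claim_equal_validate_token_py := by
  intro token _
  unfold Spec_validate_token_py validate_token_py validate_token_py_alt
  split
  · rfl
  · simp only [scanFlags_eq, Bool.false_or]
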